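-- pv_equiv track=rewrite | github.com/sudarshansudarshan/cal | backend/ai_engine/app/question_generation/services.py | batch_segments
-- ===== SOURCE A (Python) =====
-- from typing import List, Dict, Tuple
--
-- def batch_segments(segments: List[Dict],
--                segment_q_no: List[int],
--                segment_q_model: List[str],
--                max_total_questions: int = 25) -> List[Tuple[List[Dict], List[int], List[str]]]:
--     """
--     Batches segments into groups such that the sum of questions in each batch does not exceed max_total_questions.
--     Returns a list of tuples: (batch_segments, batch_q_no, batch_q_model).
--     """
--     batches = []
--     current_batch_segments = []
--     current_batch_q_no = []
--     current_batch_q_model = []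
--     current_sum = 0
--
--     for seg, qno, qmodel in zip(segments, segment_q_no, segment_q_model):
--         if current_sum + qno > max_total_questions and current_batch_segments:
--             batches.append((current_batch_segments, current_batch_q_no, current_batch_q_model))
--             current_batch_segments = []
--             current_batch_q_no = []
--             current_batch_q_model = []
--             current_sum = 0
--         current_batch_segments.append(seg)
--         current_batch_q_no.append(qno)
--         current_batch_q_model.append(qmodel)
--         current_sum += qno
--     if current_batch_segments:
--         batches.append((current_batch_segments, current_batch_q_no, current_batch_q_model))
--     return batches
-- ===== SOURCE B (Python) =====
-- def batch_segments(segments, segment_q_no, segment_q_model, max_total_questions=25):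
--     """Greedy batching by spans: find each maximal batch extent first, then slice."""
--     trips = list(zip(segments, segment_q_no, segment_q_model))
--     n = len(trips)
--     out = []
--     i = 0
--     while i < n:
--         s = trips[i][1]
--         j = i + 1
--         while j < n and s + trips[j][1] <= max_total_questions:
--             s += trips[j][1]
--             j += 1
--         chunk = trips[i:j]
--         out.append(([t[0] for t in chunk],
--                     [t[1] for t in chunk],
--                     [t[2] for t in chunk]))
--         i = j
--     return out
-- ===== Notes on version B (the rewrite author's own statement) =====
-- stated objective: alternative
-- what changed: Instead of carrying three growing batch lists and a flush-on-overflow guard through one loop, B first finds each batch's maximal span (start/end indices over the zipped triples, extending while the running sum stays within the cap) and then slices and unzips that span into the result tuple.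
import Mathlib
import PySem

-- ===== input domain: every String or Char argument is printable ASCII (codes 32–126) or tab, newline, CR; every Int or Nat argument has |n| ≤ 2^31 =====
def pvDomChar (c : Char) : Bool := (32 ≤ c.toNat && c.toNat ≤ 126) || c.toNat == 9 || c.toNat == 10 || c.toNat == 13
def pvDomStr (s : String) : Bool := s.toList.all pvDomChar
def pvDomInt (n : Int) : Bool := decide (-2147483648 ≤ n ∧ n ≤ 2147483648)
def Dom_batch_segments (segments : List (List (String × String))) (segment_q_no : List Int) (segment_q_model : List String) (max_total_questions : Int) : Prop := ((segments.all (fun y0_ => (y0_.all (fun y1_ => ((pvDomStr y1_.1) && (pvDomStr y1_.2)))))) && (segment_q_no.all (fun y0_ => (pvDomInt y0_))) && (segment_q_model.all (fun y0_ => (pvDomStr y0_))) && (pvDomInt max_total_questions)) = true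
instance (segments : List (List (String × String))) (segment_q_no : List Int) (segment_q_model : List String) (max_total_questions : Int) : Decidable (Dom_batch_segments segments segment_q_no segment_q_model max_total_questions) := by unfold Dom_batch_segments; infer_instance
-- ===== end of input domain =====

-- B replaces A's single accumulate-and-flush loop by a span-then-slice decomposition
-- (find each batch's maximal extent, then slice/unzip it); alternative, same cost.


-- ===== PORT A =====
-- A's loop: three growing current-batch lists, a running sum, flush on overflow.
def batchLoopA (maxT : Int)
    (batches : List ((List (List (String × String))) × List Int × List String))
    (cs : List (List (String × String))) (cq : List Int) (cm : List String) (s : Int) :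
    List ((List (String × String)) × Int × String) →
    List ((List (List (String × String))) × List Int × List String)
  | [] => if cs = [] then batches else batches ++ [(cs, cq, cm)]
  | (seg, qno, qm) :: rest =>
      if s + qno > maxT ∧ cs ≠ [] then
        batchLoopA maxT (batches ++ [(cs, cq, cm)]) [seg] [qno] [qm] (0 + qno) rest
      else
        batchLoopA maxT batches (cs ++ [seg]) (cq ++ [qno]) (cm ++ [qm]) (s + qno) rest

def batch_segments (segments : List (List (String × String))) (segment_q_no : List Int) (segment_q_model : List String) (max_total_questions : Int) : List ((List (List (String × String))) × List Int × List String) :=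
  batchLoopA max_total_questions [] [] [] [] 0
    ((segments.zip (segment_q_no.zip segment_q_model)).map (fun t => (t.1, t.2.1, t.2.2)))

-- ===== PORT B =====
-- B's inner while: extend the current span while the running sum stays within the cap.
def spanB (maxT s : Int) :
    List ((List (String × String)) × Int × String) →
    (List ((List (String × String)) × Int × String)) × (List ((List (String × String)) × Int × String))
  | [] => ([], [])
  | t :: ts =>
      if s + t.2.1 ≤ maxT then
        let pr := spanB maxT (s + t.2.1) ts
        (t :: pr.1, pr.2)
      else ([], t :: ts)

theorem spanB_snd_length_le (maxT s : Int)
    (ts : List ((List (String × String)) × Int × String)) :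
    (spanB maxT s ts).2.length ≤ ts.length := by
  induction ts generalizing s with
  | nil => simp [spanB]
  | cons t ts ih =>
      simp only [spanB]
      split
      · exact le_trans (ih _) (Nat.le_succ _)
      · simp

-- B's outer while: take one span, slice/unzip it, continue on the rest.
def chopB (maxT : Int) :
    List ((List (String × String)) × Int × String) →
    List ((List (List (String × String))) × List Int × List String)
  | [] => []
  | t :: ts =>
      let pr := spanB maxT t.2.1 ts
      ((t :: pr.1).map (·.1), (t :: pr.1).map (·.2.1), (t :: pr.1).map (·.2.2)) :: chopB maxT pr.2
  termination_by ts => ts.length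
  decreasing_by
    simpa using Nat.lt_succ_of_le (spanB_snd_length_le maxT t.2.1 ts)

def batch_segments_alt (segments : List (List (String × String))) (segment_q_no : List Int) (segment_q_model : List String) (max_total_questions : Int) : List ((List (List (String × String))) × List Int × List String) :=
  chopB max_total_questions
    ((segments.zip (segment_q_no.zip segment_q_model)).map (fun t => (t.1, t.2.1, t.2.2)))

-- ===== PRECONDITION & SPEC =====
def Spec_batch_segments (segments : List (List (String × String))) (segment_q_no : List Int) (segment_q_model : List String) (max_total_questions : Int) (out : List ((List (List (String × String))) × List Int × List String)) : Prop := out = batch_segments_alt segments segment_q_no segment_q_model max_total_questions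
instance (segments : List (List (String × String))) (segment_q_no : List Int) (segment_q_model : List String) (max_total_questions : Int) (out : List ((List (List (String × String))) × List Int × List String)) : Decidable (Spec_batch_segments segments segment_q_no segment_q_model max_total_questions out) := by unfold Spec_batch_segments; infer_instance

-- ===== CLAIM (what is proved, stated in full; the proofs are below) =====
def Claim_equal_batch_segments : Prop := ∀ (segments : List (List (String × String))) (segment_q_no : List Int) (segment_q_model : List String) (max_total_questions : Int), Dom_batch_segments segments segment_q_no segment_q_model max_total_questions → Spec_batch_segments segments segment_q_no segment_q_model max_total_questions (batch_segments segments segment_q_no segment_q_model max_total_questions)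

-- ===== LEMMAS AND PROOFS =====

-- A's tail loop with an accumulator factors through the empty accumulator.
theorem batchLoopA_acc (maxT : Int)
    (zs : List ((List (String × String)) × Int × String))
    (batches : List ((List (List (String × String))) × List Int × List String))
    (cs : List (List (String × String))) (cq : List Int) (cm : List String) (s : Int) :
    batchLoopA maxT batches cs cq cm s zs = batches ++ batchLoopA maxT [] cs cq cm s zs := by
  induction zs generalizing batches cs cq cm s with
  | nil => simp [batchLoopA]; split <;> simp
  | cons z zs ih =>
      obtain ⟨seg, qno, qm⟩ := z
      simp only [batchLoopA]
      split
      · rw [ih (batches ++ [(cs, cq, cm)]), ih ([] ++ [(cs, cq, cm)])]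
        simp
      · exact ih _ _ _ _ _

-- Core invariant: with a nonempty current batch, A's loop produces the current batch
-- extended by B's span, followed by B's chopping of the remainder.
theorem batchLoopA_eq_span (maxT : Int)
    (zs : List ((List (String × String)) × Int × String))
    (cur : List ((List (String × String)) × Int × String)) (s : Int) (h : cur ≠ []) :
    batchLoopA maxT [] (cur.map (·.1)) (cur.map (·.2.1)) (cur.map (·.2.2)) s zs =
      ((cur ++ (spanB maxT s zs).1).map (·.1),
       (cur ++ (spanB maxT s zs).1).map (·.2.1),
       (cur ++ (spanB maxT s zs).1).map (·.2.2)) :: chopB maxT (spanB maxT s zs).2 := by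
  induction zs generalizing cur s with
  | nil =>
      simp [batchLoopA, spanB, chopB, h]
  | cons z zs ih =>
      obtain ⟨seg, qno, qm⟩ := z
      by_cases hq : s + qno > maxT
      · have hcs : (cur.map (·.1) : List (List (String × String))) ≠ [] := by
          simpa using h
        have hspan : spanB maxT s ((seg, qno, qm) :: zs) = ([], (seg, qno, qm) :: zs) := by
          simp [spanB, not_le.mpr hq]
        simp only [batchLoopA]
        split
        · rw [batchLoopA_acc]
          have h2 := ih [((seg, qno, qm))] (0 + qno) (by simp)
          simp only [zero_add, List.map_cons, List.map_nil] at h2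
          simp only [zero_add]
          rw [h2, hspan]
          simp [chopB]
        · next hcontra => exact absurd ⟨hq, hcs⟩ hcontra
      · have hle : s + qno ≤ maxT := not_lt.mp hq
        have hspan : spanB maxT s ((seg, qno, qm) :: zs) =
            ((seg, qno, qm) :: (spanB maxT (s + qno) zs).1, (spanB maxT (s + qno) zs).2) := by
          simp [spanB, hle]
        simp only [batchLoopA]
        split
        · next hcontra => exact absurd hcontra.1 hq
        · have h2 := ih (cur ++ [((seg, qno, qm))]) (s + qno) (by simp)
          simp only [List.map_append, List.map_cons, List.map_nil] at h2
          rw [h2, hspan]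
          simp

theorem batchLoopA_eq_chopB (maxT : Int)
    (zs : List ((List (String × String)) × Int × String)) :
    batchLoopA maxT [] [] [] [] 0 zs = chopB maxT zs := by
  cases zs with
  | nil => simp [batchLoopA, chopB]
  | cons z zs =>
      obtain ⟨seg, qno, qm⟩ := z
      simp only [batchLoopA]
      split
      · next hcontra => exact absurd hcontra.2 (by simp)
      · have h2 := batchLoopA_eq_span maxT zs [((seg, qno, qm))] (0 + qno) (by simp)
        simp only [zero_add, List.map_cons, List.map_nil, List.nil_append] at h2 ⊢
        rw [h2]
        simp [chopB]

-- ===== VERDICT (by name: the statement is the Claim_ definition above) =====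
theorem batch_segments_spec : Claim_equal_batch_segments := by
  intro segments segment_q_no segment_q_model max_total_questions _
  unfold Spec_batch_segments batch_segments batch_segments_alt
  exact batchLoopA_eq_chopB _ _
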